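-- pv_equiv track=rewrite | github.com/pypi-data/pypi-mirror-95 | packages/determine-docker-tags/determine_docker_tags-0.1.5-py3-none-any.whl/determine_docker_tags/__init__.py | determine_tags
-- ===== SOURCE A (Python) =====
-- def determine_tags(version_string, app_env, include_major, include_extra_info):
--     tags = ""
--
--     if "-" in version_string:
--         extra_info = version_string[version_string.find("-") :]
--         version_string = version_string[: version_string.find("-")]
--     else:
--         extra_info = ""
--
--     if include_extra_info == "no":
--         extra_info = ""
--
--     if app_env:
--         app_env = "-" + app_env
--     else:
--         app_env = ""
--
--     while "." in version_string:
--         tags = tags + version_string + extra_info + app_env + ","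
--         version_string = version_string[: version_string.rfind(".")]
--
--     if include_major == "yes" and version_string != "0":
--         tags = tags + version_string + extra_info + app_env
--     else:
--         tags = tags[:-1]
--
--     return tags
-- ===== SOURCE B (Python) =====
-- def determine_tags(version_string, app_env, include_major, include_extra_info):
--     # One pass collects the dot positions; prefixes are sliced directly and the
--     # result is a ','.join of a list, avoiding repeated rfind trimming and the
--     # trailing-comma fixup.
--     vs, sep, rest = version_string.partition("-")
--     extra_info = "-" + rest if (sep and include_extra_info != "no") else ""
--     suffix = extra_info + ("-" + app_env if app_env else "")
--
--     cuts = [i for i, c in enumerate(vs) if c == "."]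
--     pieces = []
--     if cuts:
--         pieces.append(vs + suffix)
--         for p in reversed(cuts[1:]):
--             pieces.append(vs[:p] + suffix)
--     major = vs[:cuts[0]] if cuts else vs
--     if include_major == "yes" and major != "0":
--         pieces.append(major + suffix)
--     return ",".join(pieces)
-- ===== Notes on version B (the rewrite author's own statement) =====
-- stated objective: simpler
-- what changed: B replaces A's repeated rfind-and-trim while loop and trailing-comma string fixup by one enumerate pass collecting the dot positions, direct prefix slices, and a ','.join of a list (with str.partition for the '-' split).
import Mathlib
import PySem

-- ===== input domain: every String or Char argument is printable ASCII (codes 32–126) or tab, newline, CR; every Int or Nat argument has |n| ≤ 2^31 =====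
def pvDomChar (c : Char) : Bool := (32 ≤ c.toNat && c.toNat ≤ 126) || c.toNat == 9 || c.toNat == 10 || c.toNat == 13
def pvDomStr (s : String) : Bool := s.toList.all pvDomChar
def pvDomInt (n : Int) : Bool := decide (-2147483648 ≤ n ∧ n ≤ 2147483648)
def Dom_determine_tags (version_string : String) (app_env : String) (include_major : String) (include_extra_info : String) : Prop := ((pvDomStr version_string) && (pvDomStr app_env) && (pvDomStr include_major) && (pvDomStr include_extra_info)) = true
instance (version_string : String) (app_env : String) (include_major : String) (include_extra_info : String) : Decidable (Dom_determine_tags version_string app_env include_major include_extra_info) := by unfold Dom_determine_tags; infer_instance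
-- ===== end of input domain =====

-- B replaces A's repeated rfind-and-trim while loop by one pass collecting the dot
-- positions, slicing each prefix directly and joining a list with ',' (objective: simpler).

-- ===== PORT A =====
-- helper lemmas needed only for the termination of A's while loop (cited in decreasing_by)
theorem pvPrefix_singleton_iff (a : Char) (l : List Char) : ([a].isPrefixOf l) = true ↔ l[0]? = some a := by
  rw [List.isPrefixOf_iff_prefix]
  cases l <;> simp [List.cons_prefix_cons, eq_comm]

theorem pvPrefix_drop_iff (s : List Char) (k : Nat) (a : Char) : ([a].isPrefixOf (s.drop k)) = true ↔ s[k]? = some a := by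
  rw [pvPrefix_singleton_iff]
  simp [List.getElem?_drop]

theorem pvRfind_go_mem (s : List Char) (n : Nat) :
    PySem.Chars.rfind.go s ['.'] n = -1 ∨
    (∃ k : Nat, k ≤ n ∧ PySem.Chars.rfind.go s ['.'] n = (k : Int) ∧ ['.'].isPrefixOf (s.drop k) = true) := by
  induction n with
  | zero =>
    by_cases h : ['.'].isPrefixOf s = true
    · exact Or.inr ⟨0, le_refl 0, by simp [PySem.Chars.rfind.go, h], by simpa using h⟩
    · left; simp [PySem.Chars.rfind.go, h]
  | succ j ih =>
    by_cases h : ['.'].isPrefixOf (s.drop (j+1)) = true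
    · exact Or.inr ⟨j+1, le_refl _, by simp [PySem.Chars.rfind.go, h], h⟩
    · rcases ih with h1 | ⟨k, hk, he, hp⟩
      · left; simpa [PySem.Chars.rfind.go, h] using h1
      · exact Or.inr ⟨k, by omega, by simpa [PySem.Chars.rfind.go, h] using he, hp⟩

theorem pvRfind_go_ne (s : List Char) (n : Nat) (k : Nat) (hk : k ≤ n)
    (hp : ['.'].isPrefixOf (s.drop k) = true) : PySem.Chars.rfind.go s ['.'] n ≠ -1 := by
  induction n with
  | zero =>
    have : k = 0 := by omega
    subst this
    simp only [List.drop_zero] at hp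
    simp [PySem.Chars.rfind.go, hp]
  | succ j ih =>
    by_cases h : ['.'].isPrefixOf (s.drop (j+1)) = true
    · simp [PySem.Chars.rfind.go, h]; omega
    · have hk' : k ≤ j := by
        rcases Nat.lt_or_ge k (j+1) with h' | h'
        · omega
        · exfalso; have : k = j + 1 := by omega
          subst this; exact h hp
      simpa [PySem.Chars.rfind.go, h] using ih hk'

theorem pvSlice_rfind_lt (s : List Char) (h : PySem.Chars.isIn ['.'] s = true) :
    (PySem.List.slice s none (some (PySem.Chars.rfind s ['.']))).length < s.length := by
  have hmem : ('.' : Char) ∈ s := by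
    have := (PySem.Chars.isIn_iff_infix ['.'] s).mp h
    exact (List.singleton_infix_iff '.' s).mp this
  obtain ⟨k, hklt, hke⟩ := List.mem_iff_getElem.mp hmem
  have hkp : ['.'].isPrefixOf (s.drop k) = true := by
    rw [pvPrefix_drop_iff]
    simp [hklt, hke]
  have hne := pvRfind_go_ne s s.length k (le_of_lt hklt) hkp
  rcases pvRfind_go_mem s s.length with h1 | ⟨k', _, he, hp⟩
  · exact absurd h1 hne
  · have hlt : k' < s.length := by
      by_contra hge
      have hdn : s.drop k' = [] := List.drop_eq_nil_of_le (by omega)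
      rw [hdn] at hp
      simp [List.isPrefixOf] at hp
    have hre : PySem.Chars.rfind s ['.'] = (k' : Int) := he
    rw [hre, PySem.List.slice_to _ (by positivity)]
    simp [List.length_take]
    omega

def detA_loop (cs suf tags : List Char) : List Char × List Char :=
  if h : PySem.Chars.isIn ['.'] cs = true then
    detA_loop (PySem.List.slice cs none (some (PySem.Chars.rfind cs ['.']))) suf
      (tags ++ cs ++ suf ++ [','])
  else
    (cs, tags)
termination_by cs.length
decreasing_by exact pvSlice_rfind_lt cs h

def determine_tags (version_string : String) (app_env : String) (include_major : String) (include_extra_info : String) : String :=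
  let vs0 := version_string.toList
  let p :=
    if PySem.Chars.isIn ['-'] vs0 = true then
      (PySem.List.slice vs0 none (some (PySem.Chars.find vs0 ['-'])),
       PySem.List.slice vs0 (some (PySem.Chars.find vs0 ['-'])) none)
    else (vs0, ([] : List Char))
  let extra := if include_extra_info = "no" then ([] : List Char) else p.2
  let env := if app_env ≠ "" then '-' :: app_env.toList else ([] : List Char)
  let r := detA_loop p.1 (extra ++ env) []
  let tags2 :=
    if include_major = "yes" ∧ r.1 ≠ ['0'] then r.2 ++ r.1 ++ extra ++ env
    else PySem.List.slice r.2 none (some (-1))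
  String.ofList tags2

-- ===== PORT B =====
def determine_tags_alt (version_string : String) (app_env : String) (include_major : String) (include_extra_info : String) : String :=
  let s := version_string.toList
  -- str.partition("-") ported by hand via find (exact: the separator is one char)
  let i := PySem.Chars.find s ['-']
  let p := if i = -1 then (s, ([] : List Char), ([] : List Char))
           else (s.take i.toNat, ['-'], s.drop (i.toNat + 1))
  let extra := if p.2.1 ≠ [] ∧ include_extra_info ≠ "no" then '-' :: p.2.2 else ([] : List Char)
  let suffix := extra ++ (if app_env ≠ "" then '-' :: app_env.toList else ([] : List Char))
  let vs := p.1
  let cuts := ((PySem.List.enumerate vs).filter (fun q => q.2 == '.')).map (·.1)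
  let pieces :=
    if cuts = [] then ([] : List (List Char))
    else (vs ++ suffix) :: ((cuts.drop 1).reverse.map (fun q => PySem.List.slice vs none (some q) ++ suffix))
  let major := if cuts = [] then vs else PySem.List.slice vs none (some (cuts.headD 0))
  let pieces2 := if include_major = "yes" ∧ major ≠ ['0'] then pieces ++ [major ++ suffix] else pieces
  String.ofList (PySem.Chars.join [','] pieces2)

-- ===== PRECONDITION & SPEC =====
def Spec_determine_tags (version_string : String) (app_env : String) (include_major : String) (include_extra_info : String) (out : String) : Prop := out = determine_tags_alt version_string app_env include_major include_extra_info
instance (version_string : String) (app_env : String) (include_major : String) (include_extra_info : String) (out : String) : Decidable (Spec_determine_tags version_string app_env include_major include_extra_info out) := by unfold Spec_determine_tags; infer_instance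

-- ===== CLAIM (what is proved, stated in full; the proofs are below) =====
def Claim_equal_determine_tags : Prop := ∀ (version_string : String) (app_env : String) (include_major : String) (include_extra_info : String), Dom_determine_tags version_string app_env include_major include_extra_info → Spec_determine_tags version_string app_env include_major include_extra_info (determine_tags version_string app_env include_major include_extra_info)

-- ===== LEMMAS AND PROOFS =====

-- the ascending list of positions of '.' in a string
def cutsN : List Char → List Nat
  | [] => []
  | c :: cs => (if c = '.' then [0] else []) ++ (cutsN cs).map (· + 1)

theorem cutsN_mem (s : List Char) (k : Nat) : k ∈ cutsN s ↔ s[k]? = some '.' := by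
  induction s generalizing k with
  | nil => simp [cutsN]
  | cons c cs ih =>
    cases k with
    | zero => by_cases h : c = '.' <;> simp [cutsN, h]
    | succ j => by_cases h : c = '.' <;> simp [cutsN, h, ih]

theorem cutsN_pairwise (s : List Char) : (cutsN s).Pairwise (· < ·) := by
  induction s with
  | nil => simp [cutsN]
  | cons c cs ih =>
    have hmap : ((cutsN cs).map (· + 1)).Pairwise (· < ·) := by
      refine List.pairwise_map.mpr ?_
      exact ih.imp (by omega)
    by_cases h : c = '.'
    · rw [show cutsN (c :: cs) = 0 :: (cutsN cs).map (· + 1) by simp [cutsN, h]]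
      refine List.Pairwise.cons ?_ hmap
      intro b hb
      simp only [List.mem_map] at hb
      obtain ⟨a, -, rfl⟩ := hb
      omega
    · simpa [cutsN, h] using hmap

theorem cutsN_take (s : List Char) (m : Nat) : cutsN (s.take m) = (cutsN s).filter (fun k => k < m) := by
  induction s generalizing m with
  | nil => simp [cutsN]
  | cons c cs ih =>
    cases m with
    | zero =>
      simp only [List.take_zero, cutsN, List.filter_append]
      rw [List.filter_map]
      simp
    | succ j =>
      simp only [List.take_succ_cons, cutsN, List.filter_append, ih]
      congr 1
      · by_cases h : c = '.' <;> simp [h]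
      · rw [List.filter_map]
        apply congrArg
        apply List.filter_congr
        intro x _
        simp only [Function.comp_apply]
        by_cases h : x < j <;> simp [h]

theorem pv_le_getLast {l : List Nat} (hp : l.Pairwise (· < ·)) (hne : l ≠ []) (a : Nat) (ha : a ∈ l) :
    a ≤ l.getLast hne := by
  induction l with
  | nil => simp at ha
  | cons x t ih =>
    rcases t with _ | ⟨y, t'⟩
    · simp at ha; simp [ha]
    · rw [List.getLast_cons (by simp)]
      rcases List.mem_cons.mp ha with h_eq | ha'
      · subst h_eq
        have hx : ∀ b ∈ y :: t', a < b := (List.pairwise_cons.mp hp).1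
        have := hx _ (List.getLast_mem (l := y :: t') (by simp))
        omega
      · exact ih (List.pairwise_cons.mp hp).2 (by simp) ha'

theorem pv_filter_lt_getLast {l : List Nat} (hp : l.Pairwise (· < ·)) (hne : l ≠ []) :
    l.filter (fun k => k < l.getLast hne) = l.dropLast := by
  induction l with
  | nil => simp at hne
  | cons x t ih =>
    rcases t with _ | ⟨y, t'⟩
    · simp
    · have hne' : (y :: t') ≠ [] := by simp
      rw [List.getLast_cons hne']
      have hx : x < (y :: t').getLast hne' := by
        have hxy : ∀ b ∈ y :: t', x < b := (List.pairwise_cons.mp hp).1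
        exact hxy _ (List.getLast_mem hne')
      rw [List.filter_cons]
      rw [List.dropLast_cons_of_ne_nil hne', ← ih (List.pairwise_cons.mp hp).2 hne']
      simp [hx]

theorem pv_isIn_iff_cutsN (s : List Char) : PySem.Chars.isIn ['.'] s = true ↔ cutsN s ≠ [] := by
  rw [PySem.Chars.isIn_iff_infix, List.singleton_infix_iff, List.mem_iff_getElem?]
  constructor
  · rintro ⟨k, hk⟩ hnil
    have : k ∈ cutsN s := (cutsN_mem s k).mpr hk
    simp [hnil] at this
  · intro hne
    rcases List.exists_mem_of_ne_nil _ hne with ⟨k, hk⟩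
    exact ⟨k, (cutsN_mem s k).mp hk⟩

theorem pv_rfind_go_max (s : List Char) (m : Nat) (hm : ['.'].isPrefixOf (s.drop m) = true)
    (hmax : ∀ j, m < j → ¬ ['.'].isPrefixOf (s.drop j) = true) :
    ∀ n, m ≤ n → PySem.Chars.rfind.go s ['.'] n = (m : Int) := by
  intro n
  induction n with
  | zero =>
    intro hn
    have : m = 0 := by omega
    subst this
    simp only [List.drop_zero] at hm
    simp [PySem.Chars.rfind.go, hm]
  | succ j ih =>
    intro hn
    rcases Nat.eq_or_lt_of_le hn with h_eq | hlt
    · subst h_eq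
      simp [PySem.Chars.rfind.go, hm]
    · have hc := hmax (j+1) (by omega)
      have : ['.'].isPrefixOf (s.drop (j+1)) = false := by
        cases h' : ['.'].isPrefixOf (s.drop (j+1)) <;> simp_all
      simp [PySem.Chars.rfind.go, this]
      simpa using ih (by omega)

theorem pv_rfind_eq_getLast (s : List Char) (hne : cutsN s ≠ []) :
    PySem.Chars.rfind s ['.'] = ((cutsN s).getLast hne : Int) := by
  set m := (cutsN s).getLast hne with hm_def
  have hmem : m ∈ cutsN s := List.getLast_mem hne
  have hms : s[m]? = some '.' := (cutsN_mem s m).mp hmem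
  have hmlt : m < s.length := by
    rcases List.getElem?_eq_some_iff.mp hms with ⟨h, -⟩
    exact h
  have hm : ['.'].isPrefixOf (s.drop m) = true := (pvPrefix_drop_iff s m '.').mpr hms
  have hmax : ∀ j, m < j → ¬ ['.'].isPrefixOf (s.drop j) = true := by
    intro j hj hp
    have : j ∈ cutsN s := (cutsN_mem s j).mpr ((pvPrefix_drop_iff s j '.').mp hp)
    have := pv_le_getLast (cutsN_pairwise s) hne j this
    omega
  exact pv_rfind_go_max s m hm hmax s.length (by omega)

-- the comma-terminated tag pieces A's loop accumulates
def piecesOf (cs suf : List Char) : List (List Char) :=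
  if cutsN cs = [] then [] else
    (cs ++ suf) :: (((cutsN cs).drop 1).reverse.map (fun p => cs.take p ++ suf))

theorem pv_cutsN_take_getLast (cs : List Char) (hne : cutsN cs ≠ []) :
    cutsN (cs.take ((cutsN cs).getLast hne)) = (cutsN cs).dropLast := by
  rw [cutsN_take, pv_filter_lt_getLast (cutsN_pairwise cs) hne]

theorem pv_head_take (cs : List Char) (hne : cutsN cs ≠ []) :
    (cs.take ((cutsN cs).getLast hne)).take
        ((cutsN (cs.take ((cutsN cs).getLast hne))).headD (cs.take ((cutsN cs).getLast hne)).length)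
      = cs.take ((cutsN cs).headD cs.length) := by
  rw [pv_cutsN_take_getLast cs hne]
  rcases hd : (cutsN cs).dropLast with _ | ⟨h0, d'⟩
  · have hcs : cutsN cs = [(cutsN cs).getLast hne] := by
      have h1 := List.dropLast_append_getLast hne
      rw [hd] at h1
      simpa using h1.symm
    conv_rhs => rw [hcs]
    simp
  · have hmem : h0 ∈ cutsN cs := by
      have h1 : h0 ∈ (cutsN cs).dropLast := by rw [hd]; simp
      exact (List.dropLast_sublist _).subset h1
    have h0le : h0 ≤ (cutsN cs).getLast hne := pv_le_getLast (cutsN_pairwise cs) hne h0 hmem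
    have hhead : (cutsN cs).headD cs.length = h0 := by
      have h1 := List.dropLast_append_getLast hne
      rw [hd] at h1
      rw [← h1]
      simp
    rw [hhead]
    simp only [List.headD_cons, List.take_take]
    rw [Nat.min_eq_left h0le]

theorem pv_pieces_step (cs suf : List Char) (hne : cutsN cs ≠ []) :
    piecesOf cs suf = (cs ++ suf) :: piecesOf (cs.take ((cutsN cs).getLast hne)) suf := by
  have hc' := pv_cutsN_take_getLast cs hne
  rcases hd : (cutsN cs).dropLast with _ | ⟨h0, d'⟩
  · have hcs : cutsN cs = [(cutsN cs).getLast hne] := by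
      have h1 := List.dropLast_append_getLast hne
      rw [hd] at h1
      simpa using h1.symm
    rw [piecesOf, piecesOf, hc', hd, if_neg hne, if_pos rfl]
    conv_lhs => rw [hcs]
    simp
  · have hsplit : cutsN cs = (h0 :: d') ++ [(cutsN cs).getLast hne] := by
      rw [← hd]
      exact (List.dropLast_append_getLast hne).symm
    rw [piecesOf, piecesOf, hc', hd, if_neg hne, if_neg (by simp)]
    congr 1
    conv_lhs => rw [hsplit]
    rw [show ((h0 :: d') ++ [(cutsN cs).getLast hne] : List Nat).drop 1 = d' ++ [(cutsN cs).getLast hne] by simp]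
    rw [List.reverse_append]
    simp only [List.reverse_cons, List.reverse_nil, List.nil_append, List.singleton_append,
      List.map_cons, List.drop_succ_cons, List.drop_zero]
    congr 1
    apply List.map_congr_left
    intro p hp
    have hpmem : p ∈ cutsN cs := by
      rw [hsplit]
      have : p ∈ d' := List.mem_reverse.mp hp
      simp [this]
    have hple : p ≤ (cutsN cs).getLast hne := pv_le_getLast (cutsN_pairwise cs) hne p hpmem
    rw [List.take_take, Nat.min_eq_left hple]

theorem detA_loop_eq (cs suf tags : List Char) :
    detA_loop cs suf tags =
      (cs.take ((cutsN cs).headD cs.length),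
       tags ++ (piecesOf cs suf).flatMap (fun p => p ++ [','])) := by
  induction cs, tags using detA_loop.induct suf with
  | case1 cs tags h ih =>
    have hne := (pv_isIn_iff_cutsN cs).mp h
    have hr : PySem.Chars.rfind cs ['.'] = (((cutsN cs).getLast hne : Nat) : Int) :=
      pv_rfind_eq_getLast cs hne
    have hsl : PySem.List.slice cs none (some (PySem.Chars.rfind cs ['.'])) =
        cs.take ((cutsN cs).getLast hne) := by
      rw [hr, PySem.List.slice_to _ (by positivity)]
      simp
    rw [hsl] at ih
    rw [detA_loop, dif_pos h, hsl, ih]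
    refine Prod.ext ?_ ?_
    · exact pv_head_take cs hne
    · show (tags ++ cs ++ suf ++ [',']) ++ _ = tags ++ _
      rw [pv_pieces_step cs suf hne, List.flatMap_cons]
      simp [List.append_assoc]
  | case2 cs tags h =>
    rw [detA_loop, dif_neg h]
    have hnil : cutsN cs = [] := by
      by_contra hne
      exact h ((pv_isIn_iff_cutsN cs).mpr hne)
    simp [piecesOf, hnil]

theorem pv_join_concat (l : List (List Char)) (x : List Char) :
    PySem.Chars.join [','] (l ++ [x]) = l.flatMap (fun p => p ++ [',']) ++ x := by
  induction l with
  | nil => simp [PySem.Chars.join_singleton]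
  | cons a t ih =>
    rcases t with _ | ⟨b, t'⟩
    · simp [PySem.Chars.join_cons_cons, PySem.Chars.join_singleton]
    · rw [List.cons_append, List.cons_append, PySem.Chars.join_cons_cons, ← List.cons_append]
      rw [ih]
      simp

theorem pv_flatMap_comma_ne_nil (a : List Char) (t : List (List Char)) :
    (a :: t).flatMap (fun p => p ++ [',']) ≠ [] := by
  simp

theorem pv_join_dropLast (l : List (List Char)) :
    (l.flatMap (fun p => p ++ [','])).dropLast = PySem.Chars.join [','] l := by
  induction l with
  | nil => simp [PySem.Chars.join_nil]
  | cons a t ih =>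
    rcases t with _ | ⟨b, t'⟩
    · simp [PySem.Chars.join_singleton]
    · rw [List.flatMap_cons, List.dropLast_append_of_ne_nil (pv_flatMap_comma_ne_nil b t'), ih,
        PySem.Chars.join_cons_cons]

theorem pv_cutsB_go (s : List Char) (n : Int) :
    ((PySem.List.enumerate s n).filter (fun q => q.2 == '.')).map (Prod.fst) = (cutsN s).map (fun k : Nat => n + (k : Int)) := by
  induction s generalizing n with
  | nil => simp [PySem.List.enumerate_nil, cutsN]
  | cons c cs ih =>
    rw [PySem.List.enumerate_cons, List.filter_cons]
    by_cases h : c = '.'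
    · subst h
      rw [if_pos (by simp), show cutsN ('.' :: cs) = 0 :: (cutsN cs).map (· + 1) by simp [cutsN]]
      rw [List.map_cons, List.map_cons, ih (n+1), List.map_map]
      congr 1
      · simp
      · apply List.map_congr_left
        intro a _
        simp only [Function.comp_apply]
        push_cast
        ring
    · rw [show cutsN (c :: cs) = (cutsN cs).map (· + 1) by simp [cutsN, h]]
      have hb : (c == '.') = false := by simp [h]
      rw [hb, if_neg Bool.false_ne_true, ih (n+1), List.map_map]
      apply List.map_congr_left
      intro a _
      simp only [Function.comp_apply]
      push_cast
      ring

theorem pv_cutsB (s : List Char) :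
    ((PySem.List.enumerate s).filter (fun q => q.2 == '.')).map (Prod.fst) = (cutsN s).map (fun k : Nat => (k : Int)) := by
  rw [pv_cutsB_go s 0]
  simp

-- the post-preprocessing cores of the two ports agree
theorem pv_core (vs1 suf : List Char) (im : String) :
    (if im = "yes" ∧ (detA_loop vs1 suf []).1 ≠ ['0']
     then (detA_loop vs1 suf []).2 ++ (detA_loop vs1 suf []).1 ++ suf
     else PySem.List.slice (detA_loop vs1 suf []).2 none (some (-1)))
    = PySem.Chars.join [',']
        (if im = "yes" ∧
            (if ((PySem.List.enumerate vs1).filter (fun q => q.2 == '.')).map (Prod.fst) = []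
             then vs1
             else PySem.List.slice vs1 none
               (some ((((PySem.List.enumerate vs1).filter (fun q => q.2 == '.')).map (Prod.fst)).headD 0))) ≠ ['0']
         then (if ((PySem.List.enumerate vs1).filter (fun q => q.2 == '.')).map (Prod.fst) = []
               then ([] : List (List Char))
               else (vs1 ++ suf) ::
                 (((((PySem.List.enumerate vs1).filter (fun q => q.2 == '.')).map (Prod.fst)).drop 1).reverse.map
                   (fun q => PySem.List.slice vs1 none (some q) ++ suf))) ++
              [(if ((PySem.List.enumerate vs1).filter (fun q => q.2 == '.')).map (Prod.fst) = []
                then vs1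
                else PySem.List.slice vs1 none
                  (some ((((PySem.List.enumerate vs1).filter (fun q => q.2 == '.')).map (Prod.fst)).headD 0))) ++ suf]
         else (if ((PySem.List.enumerate vs1).filter (fun q => q.2 == '.')).map (Prod.fst) = []
               then ([] : List (List Char))
               else (vs1 ++ suf) ::
                 (((((PySem.List.enumerate vs1).filter (fun q => q.2 == '.')).map (Prod.fst)).drop 1).reverse.map
                   (fun q => PySem.List.slice vs1 none (some q) ++ suf)))) := by
  rw [detA_loop_eq vs1 suf [], pv_cutsB vs1]
  rcases hc : cutsN vs1 with _ | ⟨h0, t⟩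
  · have hp : piecesOf vs1 suf = [] := by rw [piecesOf, if_pos hc]
    simp only [hp, List.map_nil, List.flatMap_nil, List.headD_nil, List.take_length,
      List.nil_append]
    split_ifs with him
    · simp [PySem.Chars.join_singleton]
    · simp [PySem.List.slice_to_neg_one, PySem.Chars.join_nil]
  · have hBne : (h0 :: t).map (fun k : Nat => (k : Int)) ≠ [] := by simp
    have hpieces :
        ((((h0 :: t).map (fun k : Nat => (k : Int))).drop 1).reverse.map
            (fun q => PySem.List.slice vs1 none (some q) ++ suf))
          = (t.reverse.map (fun p => vs1.take p ++ suf)) := by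
      rw [List.map_cons, List.drop_succ_cons, List.drop_zero, ← List.map_reverse, List.map_map]
      apply List.map_congr_left
      intro p _
      simp only [Function.comp_apply, PySem.List.slice_to_natCast]
    have hmaj : PySem.List.slice vs1 none
        (some ((((h0 :: t).map (fun k : Nat => (k : Int))).headD 0))) = vs1.take h0 := by
      simp [PySem.List.slice_to_natCast]
    have hA1 : vs1.take ((h0 :: t).headD vs1.length) = vs1.take h0 := by simp
    have hpc : piecesOf vs1 suf = (vs1 ++ suf) :: (t.reverse.map (fun p => vs1.take p ++ suf)) := by
      rw [piecesOf, if_neg (by rw [hc]; simp), hc]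
      simp
    rw [if_neg hBne, if_neg hBne, hpieces, hmaj, hA1]
    split_ifs with him
    · rw [show ((vs1 ++ suf) :: (t.reverse.map (fun p => vs1.take p ++ suf))) ++ [vs1.take h0 ++ suf]
            = piecesOf vs1 suf ++ [vs1.take h0 ++ suf] by rw [hpc], pv_join_concat]
      simp [List.append_assoc]
    · rw [PySem.List.slice_to_neg_one, List.nil_append, ← hpc, pv_join_dropLast]

-- pv_core lifted to String with A's flat append association
theorem pv_final (vs1 extra env : List Char) (im : String) :
    String.ofList
      (if im = "yes" ∧ (detA_loop vs1 (extra ++ env) []).1 ≠ ['0']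
       then (detA_loop vs1 (extra ++ env) []).2 ++ (detA_loop vs1 (extra ++ env) []).1 ++ extra ++ env
       else PySem.List.slice (detA_loop vs1 (extra ++ env) []).2 none (some (-1)))
    = String.ofList (PySem.Chars.join [',']
        (if im = "yes" ∧
            (if ((PySem.List.enumerate vs1).filter (fun q => q.2 == '.')).map (Prod.fst) = []
             then vs1
             else PySem.List.slice vs1 none
               (some ((((PySem.List.enumerate vs1).filter (fun q => q.2 == '.')).map (Prod.fst)).headD 0))) ≠ ['0']
         then (if ((PySem.List.enumerate vs1).filter (fun q => q.2 == '.')).map (Prod.fst) = []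
               then ([] : List (List Char))
               else (vs1 ++ (extra ++ env)) ::
                 (((((PySem.List.enumerate vs1).filter (fun q => q.2 == '.')).map (Prod.fst)).drop 1).reverse.map
                   (fun q => PySem.List.slice vs1 none (some q) ++ (extra ++ env)))) ++
              [(if ((PySem.List.enumerate vs1).filter (fun q => q.2 == '.')).map (Prod.fst) = []
                then vs1
                else PySem.List.slice vs1 none
                  (some ((((PySem.List.enumerate vs1).filter (fun q => q.2 == '.')).map (Prod.fst)).headD 0))) ++ (extra ++ env)]
         else (if ((PySem.List.enumerate vs1).filter (fun q => q.2 == '.')).map (Prod.fst) = []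
               then ([] : List (List Char))
               else (vs1 ++ (extra ++ env)) ::
                 (((((PySem.List.enumerate vs1).filter (fun q => q.2 == '.')).map (Prod.fst)).drop 1).reverse.map
                   (fun q => PySem.List.slice vs1 none (some q) ++ (extra ++ env)))))) := by
  apply congrArg
  rw [show (detA_loop vs1 (extra ++ env) []).2 ++ (detA_loop vs1 (extra ++ env) []).1 ++ extra ++ env
        = (detA_loop vs1 (extra ++ env) []).2 ++ (detA_loop vs1 (extra ++ env) []).1 ++ (extra ++ env) by
      simp [List.append_assoc]]
  exact pv_core vs1 (extra ++ env) im

-- ===== VERDICT (by name: the statement is the Claim_ definition above) =====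
theorem determine_tags_spec : Claim_equal_determine_tags := by
  intro vs app im ie _
  unfold Spec_determine_tags determine_tags determine_tags_alt
  dsimp only
  by_cases hdash : PySem.Chars.isIn ['-'] vs.toList = true
  · have hfindne : PySem.Chars.find vs.toList ['-'] ≠ -1 := by
      revert hdash
      simp [PySem.Chars.isIn]
    have hge : 0 ≤ PySem.Chars.find vs.toList ['-'] := by
      rw [PySem.Chars.find_nonneg_iff]
      exact (PySem.Chars.isIn_iff_infix _ _).mp hdash
    have h1 : PySem.List.slice vs.toList none (some (PySem.Chars.find vs.toList ['-']))
        = vs.toList.take (PySem.Chars.find vs.toList ['-']).toNat := PySem.List.slice_to _ hge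
    have h2 : PySem.List.slice vs.toList (some (PySem.Chars.find vs.toList ['-'])) none
        = vs.toList.drop (PySem.Chars.find vs.toList ['-']).toNat := PySem.List.slice_from _ hge
    have h3 : vs.toList.drop (PySem.Chars.find vs.toList ['-']).toNat
        = '-' :: vs.toList.drop ((PySem.Chars.find vs.toList ['-']).toNat + 1) := by
      obtain ⟨hp, -⟩ := PySem.Chars.find_spec hge
      obtain ⟨t, ht⟩ := hp
      rw [← ht]
      have htt : t = (vs.toList.drop (PySem.Chars.find vs.toList ['-']).toNat).tail := by
        rw [← ht]; rfl
      rw [htt, List.tail_drop]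
      rfl
    rw [if_pos hdash, if_neg hfindne]
    dsimp only
    rw [h1, h2]
    have hextraAB : (if (['-'] : List Char) ≠ [] ∧ ie ≠ "no"
          then '-' :: vs.toList.drop ((PySem.Chars.find vs.toList ['-']).toNat + 1) else [])
        = (if ie = "no" then [] else vs.toList.drop (PySem.Chars.find vs.toList ['-']).toNat) := by
      by_cases hie : ie = "no" <;> simp [hie, h3]
    rw [hextraAB]
    exact pv_final (vs.toList.take (PySem.Chars.find vs.toList ['-']).toNat)
      (if ie = "no" then [] else vs.toList.drop (PySem.Chars.find vs.toList ['-']).toNat)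
      (if app ≠ "" then '-' :: app.toList else []) im
  · have hfind : PySem.Chars.find vs.toList ['-'] = -1 := by
      revert hdash
      simp [PySem.Chars.isIn]
    rw [if_neg hdash, if_pos hfind]
    dsimp only
    rw [ite_self, if_neg (show ¬(([] : List Char) ≠ [] ∧ ie ≠ "no") by simp)]
    exact pv_final vs.toList [] (if app ≠ "" then '-' :: app.toList else []) im
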